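-- pv_equiv track=rewrite | github.com/DerKevinRiehl/HierarchicalConfusionMatrix | hierarchical_confusion_matrix/HierarchicalConfusion.py | determine_M_Values
-- ===== SOURCE A (Python) =====
-- def determine_M_Values(pred_labels, w_dj):
--     m_values = []
--     for path in pred_labels:
--         m_max = -1
--         for n in w_dj:
--             for p in w_dj[n]:
--                 m_val = len(getCommonPath(p,path))
--                 if(m_val > m_max):
--                     m_max = m_val
--         m_values.append(m_max)
--     return m_values
--
-- def getCommonPath(true_path, pred_path):
--     common_path = []
--     for node in true_path:
--         if node in pred_path:
--             common_path.append(node)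
--         else:
--             break
--     return common_path
-- ===== SOURCE B (Python) =====
-- def determine_M_Values(pred_labels, w_dj):
--     # Build a trie of all true paths once, then answer each predicted path by a
--     # DFS over the trie that only descends into nodes present in the pred path.
--     root = {}
--     has_path = False
--     for n in w_dj:
--         for p in w_dj[n]:
--             has_path = True
--             node = root
--             for x in p:
--                 node = node.setdefault(x, {})
--     if not has_path:
--         return [-1] * len(pred_labels)
--     out = []
--     for path in pred_labels:
--         S = set(path)
--         out.append(_max_depth(root, S, 0))
--     return out
--
-- def _max_depth(node, S, d):
--     best = d
--     for label, child in node.items():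
--         if label in S:
--             v = _max_depth(child, S, d + 1)
--             if v > best:
--                 best = v
--     return best
-- ===== Notes on version B (the rewrite author's own statement) =====
-- stated objective: faster
-- what changed: B builds a shared-prefix trie of all true paths once and answers each predicted path with a single DFS restricted to the pred's node set, instead of rescanning every true path for every prediction.
import Mathlib
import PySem

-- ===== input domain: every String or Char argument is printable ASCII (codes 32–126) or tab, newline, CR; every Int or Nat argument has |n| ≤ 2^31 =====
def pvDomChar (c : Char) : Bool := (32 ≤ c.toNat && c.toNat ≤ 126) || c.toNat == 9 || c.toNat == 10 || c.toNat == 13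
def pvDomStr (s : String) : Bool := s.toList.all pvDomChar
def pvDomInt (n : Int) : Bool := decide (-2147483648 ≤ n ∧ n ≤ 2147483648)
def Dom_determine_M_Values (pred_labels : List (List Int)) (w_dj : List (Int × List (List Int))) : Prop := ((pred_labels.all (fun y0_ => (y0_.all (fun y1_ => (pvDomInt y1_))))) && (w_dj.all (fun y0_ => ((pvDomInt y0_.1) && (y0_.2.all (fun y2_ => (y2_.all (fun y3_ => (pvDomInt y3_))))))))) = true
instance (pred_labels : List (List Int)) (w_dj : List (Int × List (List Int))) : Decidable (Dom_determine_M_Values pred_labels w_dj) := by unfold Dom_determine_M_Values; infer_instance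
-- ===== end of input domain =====

-- B replaces A's per-prediction rescan of every true path with one shared-prefix trie of
-- the true paths plus a set-restricted DFS per prediction (measurably faster on large inputs).
-- ===== PORT A =====
def getCommonPath : List Int → List Int → List Int
  | [], _ => []
  | n :: rest, pred_path => if n ∈ pred_path then n :: getCommonPath rest pred_path else []

def determine_M_Values (pred_labels : List (List Int)) (w_dj : List (Int × List (List Int))) : List Int :=
  pred_labels.foldl (fun m_values path =>
    m_values ++ [((PySem.Dict.mk w_dj).keys).foldl (fun m_max n =>
        ((PySem.Dict.mk w_dj).getD n []).foldl (fun m_max p =>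
          let m_val : Int := (getCommonPath p path).length
          if m_val > m_max then m_val else m_max) m_max) (-1 : Int)]) []


-- ===== PORT B =====
-- Trie of true paths: each node's dict of children is a first-child/next-sibling chain
-- (the chain is the association list of a node's children, in insertion order).
inductive PVTrie where
  | nil : PVTrie
  | cons : Int → PVTrie → PVTrie → PVTrie

-- node.setdefault(x, {}) descent, looping over the path (insert path into a children chain)
def trieInsert : PVTrie → List Int → PVTrie
  | t, [] => t
  | .nil, x :: xs => .cons x (trieInsert .nil xs) .nil
  | .cons l c sib, x :: xs =>
      if l = x then .cons l (trieInsert c xs) sib else .cons l c (trieInsert sib (x :: xs))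
termination_by t p => (p.length, sizeOf t)

-- the 'for label, child in node.items()' loop of _max_depth, carrying best
def maxDepthC : PVTrie → List Int → Int → Int → Int
  | .nil, _, _, best => best
  | .cons l c sib, S, d, best =>
      maxDepthC sib S d
        (if l ∈ S then (let v := maxDepthC c S (d + 1) (d + 1); if v > best then v else best) else best)
-- _max_depth(node, S, d): best starts at d
def maxDepth (t : PVTrie) (S : List Int) (d : Int) : Int := maxDepthC t S d d

def determine_M_Values_alt (pred_labels : List (List Int)) (w_dj : List (Int × List (List Int))) : List Int :=
  let st := ((PySem.Dict.mk w_dj).keys).foldl (fun (st : PVTrie × Bool) n =>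
      ((PySem.Dict.mk w_dj).getD n []).foldl (fun st p => (trieInsert st.1 p, true)) st)
    (PVTrie.nil, false)
  if st.2 = false then pred_labels.map (fun _ => (-1 : Int))
  else pred_labels.map (fun path => maxDepth st.1 (PySem.Set.ofList path) 0)

-- ===== PRECONDITION & SPEC =====
def Spec_determine_M_Values (pred_labels : List (List Int)) (w_dj : List (Int × List (List Int))) (out : List Int) : Prop := out = determine_M_Values_alt pred_labels w_dj
instance (pred_labels : List (List Int)) (w_dj : List (Int × List (List Int))) (out : List Int) : Decidable (Spec_determine_M_Values pred_labels w_dj out) := by unfold Spec_determine_M_Values; infer_instance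

-- ===== CLAIM (what is proved, stated in full; the proofs are below) =====
def Claim_equal_determine_M_Values : Prop := ∀ (pred_labels : List (List Int)) (w_dj : List (Int × List (List Int))), Dom_determine_M_Values pred_labels w_dj → Spec_determine_M_Values pred_labels w_dj (determine_M_Values pred_labels w_dj)

-- ===== LEMMAS AND PROOFS =====

-- prefix length of p counting leading nodes that are members of S (the common quantity of both programs)
def plen (S : List Int) : List Int → Int
  | [] => 0
  | x :: xs => if x ∈ S then 1 + plen S xs else 0

theorem plen_nonneg (S : List Int) (p : List Int) : 0 ≤ plen S p := by
  induction p with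
  | nil => simp [plen]
  | cons x xs ih => simp only [plen]; split <;> omega

theorem if_gt_eq_max (v b : Int) : (if v > b then v else b) = max b v := by
  split <;> omega

theorem gcl_eq (p path : List Int) : ((getCommonPath p path).length : Int) = plen path p := by
  induction p with
  | nil => simp [getCommonPath, plen]
  | cons x xs ih =>
      simp only [getCommonPath, plen]
      split
      · simp only [List.length_cons]; push_cast; omega
      · simp

theorem plen_ofList (path p : List Int) : plen (PySem.Set.ofList path) p = plen path p := by
  induction p with
  | nil => rfl
  | cons x xs ih => simp [plen, ih, PySem.Set.mem_ofList]

theorem maxDepthC_cons (l : Int) (c sib : PVTrie) (S : List Int) (d b : Int) :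
    maxDepthC (.cons l c sib) S d b
      = maxDepthC sib S d (if l ∈ S then max b (maxDepthC c S (d + 1) (d + 1)) else b) := by
  simp only [maxDepthC, if_gt_eq_max]

theorem maxDepthC_max (cs : PVTrie) (S : List Int) (d : Int) :
    ∀ b1 b2 : Int, maxDepthC cs S d (max b1 b2) = max b1 (maxDepthC cs S d b2) := by
  induction cs with
  | nil => intro b1 b2; simp [maxDepthC]
  | cons l c sib ihc ihs =>
      intro b1 b2
      rw [maxDepthC_cons, maxDepthC_cons]
      by_cases hl : l ∈ S
      · simp only [hl, if_true, max_assoc, ihs]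
      · simp only [hl, if_false, ihs]

theorem maxDepthC_ge (cs : PVTrie) (S : List Int) (d b : Int) : b ≤ maxDepthC cs S d b := by
  have h := maxDepthC_max cs S d b b
  rw [max_self] at h
  rw [h]; exact le_max_left _ _

theorem maxDepth_insert (S : List Int) (p : List Int) :
    ∀ (t : PVTrie) (d : Int),
      maxDepth (trieInsert t p) S d = max (maxDepth t S d) (d + plen S p) := by
  induction p with
  | nil =>
      intro t d
      simp only [trieInsert, plen, add_zero, maxDepth]
      exact (max_eq_left (maxDepthC_ge t S d d)).symm
  | cons x xs ih =>
      intro t d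
      have haux : ∀ (cs : PVTrie) (b : Int),
          maxDepthC (trieInsert cs (x :: xs)) S d b
            = if x ∈ S then max (maxDepthC cs S d b) ((d + 1) + plen S xs)
              else maxDepthC cs S d b := by
        intro cs
        induction cs with
        | nil =>
            intro b
            by_cases hx : x ∈ S
            · simp only [trieInsert, maxDepthC_cons, hx, if_true, maxDepthC]
              have h0 := ih PVTrie.nil (d + 1)
              simp only [maxDepth, maxDepthC] at h0
              rw [h0]
              have := plen_nonneg S xs
              omega
            · simp [trieInsert, maxDepthC_cons, hx, maxDepthC]
        | cons l c sib ihc ihs =>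
            intro b
            by_cases hlx : l = x
            · subst hlx
              simp only [trieInsert, if_true]
              rw [maxDepthC_cons, maxDepthC_cons]
              by_cases hx : l ∈ S
              · simp only [hx, if_true]
                have h0 := ih c (d + 1)
                simp only [maxDepth] at h0
                rw [h0]
                rw [show max b (max (maxDepthC c S (d + 1) (d + 1)) (d + 1 + plen S xs))
                      = max ((d + 1) + plen S xs) (max b (maxDepthC c S (d + 1) (d + 1))) by
                    omega]
                rw [maxDepthC_max]
                omega
              · simp [hx]
            · simp only [trieInsert, hlx, if_false]
              rw [maxDepthC_cons, maxDepthC_cons]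
              by_cases hx : x ∈ S <;> simp only [hx, if_true, if_false] <;> rw [ihs]
              · simp [hx]
              · simp [hx]
      simp only [maxDepth]
      rw [haux t d]
      by_cases hx : x ∈ S
      · simp only [hx, if_true, plen]
        omega
      · simp only [hx, if_false, plen]
        have := maxDepthC_ge t S d d
        omega

theorem maxDepth_foldl (S : List Int) (L : List (List Int)) :
    ∀ (t : PVTrie) (d : Int),
      maxDepth (L.foldl trieInsert t) S d
        = L.foldl (fun m p => max m (d + plen S p)) (maxDepth t S d) := by
  induction L with
  | nil => intro t d; rfl
  | cons p L' ih =>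
      intro t d
      simp only [List.foldl_cons]
      rw [ih, maxDepth_insert]

-- B's build loop over (trie, flag) pairs, characterised
theorem pairfold_inner (ps : List (List Int)) :
    ∀ st : PVTrie × Bool,
      ps.foldl (fun st p => (trieInsert st.1 p, true)) st
        = (ps.foldl trieInsert st.1, st.2 || !ps.isEmpty) := by
  induction ps with
  | nil => intro st; simp
  | cons p ps' ih => intro st; simp [ih]

theorem notEmpty_append (a b : List (List Int)) :
    (!((a ++ b).isEmpty)) = (!a.isEmpty || !b.isEmpty) := by
  cases a <;> simp

theorem pairfold_outer (g : Int → List (List Int)) (ks : List Int) :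
    ∀ st : PVTrie × Bool,
      ks.foldl (fun st n => (g n).foldl (fun st p => (trieInsert st.1 p, true)) st) st
        = ((ks.flatMap g).foldl trieInsert st.1, st.2 || !(ks.flatMap g).isEmpty) := by
  induction ks with
  | nil => intro st; simp
  | cons k ks' ih =>
      intro st
      simp only [List.foldl_cons, List.flatMap_cons, List.foldl_append, notEmpty_append]
      rw [pairfold_inner, ih]
      simp [Bool.or_assoc]

-- A's inner double loop over keys+lookup equals one fold over the concatenated true paths
theorem ainner_eq (w_dj : List (Int × List (List Int))) (path : List Int) :
    ((PySem.Dict.mk w_dj).keys).foldl (fun m_max n =>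
        ((PySem.Dict.mk w_dj).getD n []).foldl (fun m_max p =>
          let m_val : Int := (getCommonPath p path).length
          if m_val > m_max then m_val else m_max) m_max) (-1 : Int)
      = (((PySem.Dict.mk w_dj).keys).flatMap (fun n => (PySem.Dict.mk w_dj).getD n [])).foldl
          (fun m p => max m (plen path p)) (-1 : Int) := by
  rw [List.foldl_flatMap]
  refine PySem.List.foldl_congr_mem _ _ _ _ (fun m n _ => ?_)
  refine PySem.List.foldl_congr_mem _ _ _ _ (fun m p _ => ?_)
  simp only [if_gt_eq_max, gcl_eq]

theorem foldl_max_neg_one (path : List Int) (L : List (List Int)) (h : L ≠ []) :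
    L.foldl (fun m p => max m (plen path p)) (-1 : Int)
      = L.foldl (fun m p => max m (plen path p)) (0 : Int) := by
  cases L with
  | nil => exact absurd rfl h
  | cons p L' =>
      simp only [List.foldl_cons]
      have := plen_nonneg path p
      rw [show max (-1 : Int) (plen path p) = max 0 (plen path p) by omega]

-- ===== VERDICT (by name: the statement is the Claim_ definition above) =====
theorem determine_M_Values_spec : Claim_equal_determine_M_Values := by
  intro pred_labels w_dj _
  show determine_M_Values pred_labels w_dj = determine_M_Values_alt pred_labels w_dj
  unfold determine_M_Values determine_M_Values_alt
  rw [PySem.List.foldl_append_singleton_eq_map, List.nil_append]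
  rw [pairfold_outer]
  simp only [Bool.false_or]
  set aps := ((PySem.Dict.mk w_dj).keys).flatMap (fun n => (PySem.Dict.mk w_dj).getD n [])
    with haps
  by_cases hnil : aps = []
  · simp only [hnil, List.isEmpty_nil, Bool.not_true, if_pos]
    refine List.map_congr_left (fun path _ => ?_)
    rw [ainner_eq, ← haps, hnil]
    rfl
  · rw [if_neg (by simp [hnil])]
    refine List.map_congr_left (fun path _ => ?_)
    rw [ainner_eq, ← haps, foldl_max_neg_one path aps hnil]
    rw [maxDepth_foldl]
    have h0 : maxDepth PVTrie.nil (PySem.Set.ofList path) 0 = 0 := rfl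
    rw [h0]
    refine PySem.List.foldl_congr_mem _ _ _ _ (fun m p _ => ?_)
    rw [plen_ofList, zero_add]
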